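-- pv_equiv track=rewrite | github.com/ulnic/weatherSensor | data/envLibrary/tempHumidity_lib.py | _crc8
-- ===== SOURCE A (Python) =====
-- def _crc8(buffer):
--     """ Polynomial 0x31 (x8 + x5 +x4 +1) """
--
--     polynomial = 0x31;
--     crc = 0xFF;
--
--     index = 0
--     for index in range(0, len(buffer)):
--         crc ^= buffer[index]
--         for i in range(8, 0, -1):
--             if crc & 0x80:
--                 crc = (crc << 1) ^ polynomial
--             else:
--                 crc = (crc << 1)
--     return crc & 0xFF
-- ===== SOURCE B (Python) =====
-- def _make_table():
--     table = []
--     for byte in range(256):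
--         c = byte
--         for _ in range(8):
--             if c & 0x80:
--                 c = ((c << 1) ^ 0x31) & 0xFF
--             else:
--                 c = (c << 1) & 0xFF
--         table.append(c)
--     return table
--
--
-- _CRC8_TABLE = _make_table()
--
--
-- def _crc8(buffer):
--     """ Polynomial 0x31 (x8 + x5 +x4 +1) """
--     crc = 0xFF
--     for b in buffer:
--         crc = _CRC8_TABLE[(crc ^ b) & 0xFF]
--     return crc
-- ===== Notes on version B (the rewrite author's own statement) =====
-- stated objective: faster
-- what changed: Replaces A's per-byte 8-iteration shift-and-XOR inner loop by a 256-entry CRC table precomputed once, so the main loop does a single table lookup per byte; B also keeps the crc masked to 8 bits instead of A's unboundedly growing unmasked integer.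
import Mathlib
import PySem

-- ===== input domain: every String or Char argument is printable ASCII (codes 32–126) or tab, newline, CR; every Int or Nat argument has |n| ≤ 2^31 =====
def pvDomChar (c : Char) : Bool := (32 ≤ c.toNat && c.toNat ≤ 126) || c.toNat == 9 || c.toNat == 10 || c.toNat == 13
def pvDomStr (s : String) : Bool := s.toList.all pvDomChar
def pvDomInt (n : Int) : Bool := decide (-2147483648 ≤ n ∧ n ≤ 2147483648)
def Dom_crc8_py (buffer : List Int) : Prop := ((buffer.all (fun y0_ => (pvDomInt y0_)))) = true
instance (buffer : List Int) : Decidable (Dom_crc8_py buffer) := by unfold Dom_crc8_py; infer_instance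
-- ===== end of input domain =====

-- B replaces A's per-byte 8-iteration bit loop by a precomputed 256-entry CRC table
-- and a single lookup per byte (objective: faster by a constant factor).

-- ===== PORT A =====
-- inner 'for i in range(8, 0, -1)' body (i is unused by the Python loop body)
def crc8InnerStep (crc : Int) (_i : Int) : Int :=
  if PySem.Int.band crc 128 ≠ 0 then
    PySem.Int.bxor (crc <<< (1 : Nat)) 49
  else
    crc <<< (1 : Nat)

-- outer 'for index in range(0, len(buffer))' body
def crc8OuterStep (buffer : List Int) (crc : Int) (index : Int) : Int :=
  (PySem.List.pyRange 8 0 (-1)).foldl crc8InnerStep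
    (PySem.Int.bxor crc (PySem.List.pyGetD buffer index 0))

def crc8_py (buffer : List Int) : Int :=
  PySem.Int.band
    ((PySem.List.pyRange 0 (PySem.List.len buffer) 1).foldl (crc8OuterStep buffer) 255)
    255

-- ===== PORT B =====
-- body of the table builder's inner 'for _ in range(8)' loop
def crc8TableStep (c : Int) (_j : Int) : Int :=
  if PySem.Int.band c 128 ≠ 0 then
    PySem.Int.band (PySem.Int.bxor (c <<< (1 : Nat)) 49) 255
  else
    PySem.Int.band (c <<< (1 : Nat)) 255

def crc8TableEntry (byte : Int) : Int :=
  (PySem.List.pyRange 0 8 1).foldl crc8TableStep byte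

-- _CRC8_TABLE = _make_table()
def crc8Table : List Int := (PySem.List.pyRange 0 256 1).map crc8TableEntry

def crc8_py_alt (buffer : List Int) : Int :=
  buffer.foldl
    (fun crc b => PySem.List.pyGetD crc8Table (PySem.Int.band (PySem.Int.bxor crc b) 255) 0)
    255

-- ===== PRECONDITION & SPEC =====
def Spec_crc8_py (buffer : List Int) (out : Int) : Prop := out = crc8_py_alt buffer
instance (buffer : List Int) (out : Int) : Decidable (Spec_crc8_py buffer out) := by unfold Spec_crc8_py; infer_instance

-- ===== CLAIM (what is proved, stated in full; the proofs are below) =====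
def Claim_equal_crc8_py : Prop := ∀ (buffer : List Int), Dom_crc8_py buffer → Spec_crc8_py buffer (crc8_py buffer)

-- ===== LEMMAS AND PROOFS =====

-- Nat facts about the low byte
lemma natAnd255 (a : Nat) : a &&& 255 = a % 256 := by
  have h := Nat.and_two_pow_sub_one_eq_mod a 8
  norm_num at h
  exact h

lemma natXorLow (a b : Nat) : (a ^^^ b) % 256 = (a % 256) ^^^ (b % 256) := by
  have h := @Nat.xor_mod_two_pow a b 8
  norm_num at h
  exact h

lemma natAnd128 (a : Nat) : a &&& 128 = (a % 256) &&& 128 := by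
  have h := @Nat.and_mod_two_pow a 128 8
  norm_num at h
  have hle : a &&& 128 ≤ 128 := Nat.and_le_right
  omega

set_option maxRecDepth 8192 in
lemma natCompl (u : Nat) (h : u < 256) : 255 - u = 255 ^^^ u := by
  revert h; revert u; decide

set_option maxRecDepth 8192 in
lemma natFlip128 (t : Nat) (h : t < 256) : 128 - (t &&& 128) = (255 - t) &&& 128 := by
  revert h; revert t; decide

lemma xorLtTwoPow (s t : Nat) (hs : s < 256) (ht : t < 256) : s ^^^ t < 256 := by
  have h := @Nat.xor_lt_two_pow s t 8 (by norm_num[hs]) (by norm_num[ht])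
  norm_num at h
  exact h

lemma xorComplRight (s t : Nat) (hs : s < 256) (ht : t < 256) :
    255 - (s ^^^ t) = s ^^^ (255 - t) := by
  rw [natCompl t ht, natCompl (s ^^^ t) (xorLtTwoPow s t hs ht)]
  rw [← Nat.xor_assoc, Nat.xor_comm 255 s, Nat.xor_assoc]

lemma xorComplBoth (s t : Nat) (hs : s < 256) (ht : t < 256) :
    (255 - s) ^^^ (255 - t) = s ^^^ t := by
  rw [natCompl s hs, natCompl t ht]
  rw [Nat.xor_assoc, ← Nat.xor_assoc s 255, Nat.xor_comm s 255, Nat.xor_assoc,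
      ← Nat.xor_assoc, Nat.xor_self, Nat.zero_xor]

-- Int facts: band/bxor mod 256 (Python two's complement, any sign)
lemma bandLow255 (x : Int) : PySem.Int.band x 255 = x % 256 := by
  unfold PySem.Int.band
  have h255 : (255 : Int).toNat = 255 := rfl
  by_cases hx : 0 ≤ x
  · rw [if_pos hx, if_pos (by norm_num : (0:Int) ≤ 255), h255, natAnd255]
    omega
  · rw [if_neg hx, if_pos (by norm_num : (0:Int) ≤ 255), h255, Nat.and_comm, natAnd255]
    omega

lemma bandBit7 (x : Int) : PySem.Int.band x 128 = (((x % 256).toNat &&& 128 : Nat) : Int) := by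
  unfold PySem.Int.band
  have h128 : (128 : Int).toNat = 128 := rfl
  by_cases hx : 0 ≤ x
  · rw [if_pos hx, if_pos (by norm_num : (0:Int) ≤ 128), h128]
    have h1 : (x % 256).toNat = x.toNat % 256 := by omega
    rw [h1, ← natAnd128]
  · rw [if_neg hx, if_pos (by norm_num : (0:Int) ≤ 128), h128, Nat.and_comm, natAnd128]
    have h1 : (x % 256).toNat = 255 - (-x - 1).toNat % 256 := by omega
    rw [h1, ← natFlip128 _ (Nat.mod_lt _ (by norm_num))]

lemma bxorLow (x v : Int) :
    (PySem.Int.bxor x v) % 256 = (((x % 256).toNat ^^^ (v % 256).toNat : Nat) : Int) := by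
  unfold PySem.Int.bxor
  by_cases hx : 0 ≤ x <;> by_cases hv : 0 ≤ v
  · rw [if_pos hx, if_pos hv]
    have h1 : (x % 256).toNat = x.toNat % 256 := by omega
    have h2 : (v % 256).toNat = v.toNat % 256 := by omega
    rw [h1, h2, ← natXorLow]
    omega
  · rw [if_pos hx, if_neg hv]
    set a := x.toNat with ha
    set m := (-v - 1).toNat with hm
    have h1 : (x % 256).toNat = a % 256 := by omega
    have h2 : (v % 256).toNat = 255 - m % 256 := by omega
    rw [h1, h2, ← xorComplRight (a % 256) (m % 256) (Nat.mod_lt _ (by norm_num)) (Nat.mod_lt _ (by norm_num)),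
        ← natXorLow]
    omega
  · rw [if_neg hx, if_pos hv]
    set m := (-x - 1).toNat with hm
    set b := v.toNat with hb
    have h1 : (x % 256).toNat = 255 - m % 256 := by omega
    have h2 : (v % 256).toNat = b % 256 := by omega
    rw [h1, h2, Nat.xor_comm (255 - m % 256) (b % 256),
        ← xorComplRight (b % 256) (m % 256) (Nat.mod_lt _ (by norm_num)) (Nat.mod_lt _ (by norm_num)),
        ← natXorLow, Nat.xor_comm b m]
    omega
  · rw [if_neg hx, if_neg hv]
    set m := (-x - 1).toNat with hm
    set n := (-v - 1).toNat with hn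
    have h1 : (x % 256).toNat = 255 - m % 256 := by omega
    have h2 : (v % 256).toNat = 255 - n % 256 := by omega
    rw [h1, h2, xorComplBoth (m % 256) (n % 256) (Nat.mod_lt _ (by norm_num)) (Nat.mod_lt _ (by norm_num)),
        ← natXorLow]
    omega

-- same low byte in, same low byte through one xor
lemma bxorLow_congr {x y : Int} (v : Int) (h : x % 256 = y % 256) :
    (PySem.Int.bxor x v) % 256 = (PySem.Int.bxor y v) % 256 := by
  rw [bxorLow, bxorLow, h]

-- one unmasked A-step has the same low byte as one masked B-step on the low byte
lemma stepLow (c i j : Int) :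
    (crc8InnerStep c i) % 256 = crc8TableStep (c % 256) j := by
  have hcond : PySem.Int.band c 128 = PySem.Int.band (c % 256) 128 := by
    rw [bandBit7, bandBit7, Int.emod_emod_of_dvd _ dvd_rfl]
  have hshift : ∀ d : Int, d <<< (1 : Nat) = 2 * d := by
    intro d; simp [Int.shiftLeft_eq]; ring
  have hlow : (c <<< (1 : Nat)) % 256 = ((c % 256) <<< (1 : Nat)) % 256 := by
    rw [hshift, hshift]; omega
  unfold crc8InnerStep crc8TableStep
  rw [hcond]
  split_ifs with h
  · rw [bandLow255]
    exact bxorLow_congr 49 hlow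
  · rw [bandLow255]
    exact hlow

lemma foldLow : ∀ (l l' : List Int) (a : Int), l.length = l'.length →
    (l.foldl crc8InnerStep a) % 256 = l'.foldl crc8TableStep (a % 256)
  | [], [], a, _ => by simp
  | x :: l, y :: l', a, h => by
    simp only [List.foldl_cons]
    rw [foldLow l l' (crc8InnerStep a x) (by simpa using h), stepLow a x y]
  | [], _ :: _, _, h => by simp at h
  | _ :: _, [], _, h => by simp at h

-- the inner 8-iteration loop, mod 256, is the table entry of the low byte
lemma innerEq (a : Int) :
    ((PySem.List.pyRange 8 0 (-1)).foldl crc8InnerStep a) % 256 = crc8TableEntry (a % 256) := by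
  unfold crc8TableEntry
  exact foldLow _ _ a (by decide)

-- table lookup at the masked index is the table entry of the low byte
lemma lookupEq (x : Int) :
    PySem.List.pyGetD crc8Table (PySem.Int.band x 255) 0 = crc8TableEntry (x % 256) := by
  unfold crc8Table
  rw [bandLow255]
  exact PySem.List.pyGetD_map_pyRange_of_nonneg crc8TableEntry 256 (x % 256) 0
    (Int.emod_nonneg x (by norm_num)) (Int.emod_lt_of_pos x (by norm_num))

-- main loop invariant: B's crc is the low byte of A's crc
lemma outerEq : ∀ (bs : List Int) (a b : Int), b = a % 256 →
    (bs.foldl (fun c v => (PySem.List.pyRange 8 0 (-1)).foldl crc8InnerStep (PySem.Int.bxor c v)) a) % 256 =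
    bs.foldl (fun crc v => PySem.List.pyGetD crc8Table (PySem.Int.band (PySem.Int.bxor crc v) 255) 0) b
  | [], a, b, h => by simpa using h.symm
  | v :: bs, a, b, h => by
    simp only [List.foldl_cons]
    apply outerEq
    rw [lookupEq]
    have hb : b % 256 = a % 256 := by rw [h, Int.emod_emod_of_dvd _ dvd_rfl]
    rw [bxorLow_congr v hb, ← innerEq]

-- A's fold over indices is a fold over the buffer's elements
lemma foldIdx (buffer : List Int) :
    (PySem.List.pyRange 0 (PySem.List.len buffer) 1).foldl (crc8OuterStep buffer) 255 =
    buffer.foldl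
      (fun c v => (PySem.List.pyRange 8 0 (-1)).foldl crc8InnerStep (PySem.Int.bxor c v)) 255 := by
  conv_rhs => rw [← PySem.List.map_pyGetD_pyRange_zero buffer (0 : Int)]
  rw [List.foldl_map]
  rfl

-- ===== VERDICT (by name: the statement is the Claim_ definition above) =====
theorem crc8_py_spec : Claim_equal_crc8_py := by
  intro buffer _
  unfold Spec_crc8_py crc8_py crc8_py_alt
  rw [bandLow255, foldIdx]
  exact outerEq buffer 255 255 rfl
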